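-- pv_equiv track=rewrite | github.com/kevingrillet/Py-AdventOfCode | 2015/08/main.py | part_one
-- ===== SOURCE A (Python) =====
-- def part_one(inpt: list[str]) -> int:
--     lines = inpt.copy()
--     result = 0
--     for line in lines:
--         # literals
--         result += len(line)
--
--         line = line.strip()[1:-1]
--
--         i = 0
--         while i < len(line):
--             # in memory
--             result -= 1
--             if line[i] == '\\':
--                 if line[i + 1] == 'x':
--                     i += 4
--                 else:
--                     i += 2
--             else:
--                 i += 1
--
--     return result
-- ===== SOURCE B (Python) =====
-- def part_one(inpt: list[str]) -> int:
--     def saved(s: str) -> int: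
--         # characters saved when decoding s: an escape token is '\' plus up to
--         # three following characters ('\x..' -> 4 raw chars, '\.' -> 2), each
--         # token decodes to one memory character.
--         if not s:
--             return 0
--         if s[0] != '\\':
--             return saved(s[1:])
--         if s[1] == 'x':
--             return len(s[:4]) - 1 + saved(s[4:])
--         return 1 + saved(s[2:])
--
--     total = 0
--     for line in inpt:
--         inner = line.strip()[1:-1]
--         total += len(line) - len(inner) + saved(inner)
--     return total
-- ===== Notes on version B (the rewrite author's own statement) =====
-- stated objective: alternative
-- what changed: A walks each decoded literal with an index counter subtracting one per memory character; B computes per-line savings directly by structural recursion on string suffixes (escape token = backslash plus up to three chars) and sums len(line)-len(inner)+saved(inner).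
-- outside the precondition, e.g. on part_one(['"a\\"']): A raises IndexError, B raises IndexError
import Mathlib
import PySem

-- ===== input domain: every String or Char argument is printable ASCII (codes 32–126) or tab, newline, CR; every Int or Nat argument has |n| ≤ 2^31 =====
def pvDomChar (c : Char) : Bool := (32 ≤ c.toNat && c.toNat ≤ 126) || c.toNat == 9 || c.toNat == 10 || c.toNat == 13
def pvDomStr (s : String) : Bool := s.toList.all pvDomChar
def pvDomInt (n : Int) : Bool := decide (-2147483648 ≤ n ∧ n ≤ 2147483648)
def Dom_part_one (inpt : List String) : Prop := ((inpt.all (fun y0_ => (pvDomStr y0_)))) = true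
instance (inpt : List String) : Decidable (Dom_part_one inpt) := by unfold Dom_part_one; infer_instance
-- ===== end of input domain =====

-- B replaces A's index-walk counting memory characters by a structural recursion
-- computing per-line escape savings; alternative decomposition, same cost.

-- ===== PORT A =====
-- the while loop of A: i the index, acc the running result; none = IndexError at line[i+1]
def pvLoopA (s : List Char) (i : Nat) (acc : Int) : Option Int :=
  if h : i < s.length then
    if s[i] = '\\' then
      match s[i+1]? with
      | none => none
      | some d => if d = 'x' then pvLoopA s (i+4) (acc - 1) else pvLoopA s (i+2) (acc - 1)
    else pvLoopA s (i+1) (acc - 1)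
  else some acc
termination_by s.length - i
decreasing_by all_goals omega

def part_one (inpt : List String) : Int :=
  (inpt.foldl
    (fun acc line =>
      acc.bind (fun r =>
        pvLoopA (PySem.Str.slice (PySem.Str.strip line) (some 1) (some (-1))).toList 0
          (r + PySem.Str.len line)))
    (some 0)).getD 0  -- none = Python raised IndexError; excluded by Pre_part_one

-- ===== PORT B =====
-- Source B's saved: characters saved when decoding s; none = IndexError at s[1]
def pvSaved (s : List Char) : Option Int :=
  match s with
  | [] => some 0
  | c :: rest =>
    if c ≠ '\\' then pvSaved rest
    else
      match rest with
      | [] => none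
      | d :: rest2 =>
        if d = 'x' then
          (pvSaved (rest2.drop 2)).map (fun v => (((c :: rest).take 4).length : Int) - 1 + v)
        else (pvSaved rest2).map (fun v => 1 + v)
termination_by s.length
decreasing_by all_goals (simp; try omega)

def pvContrib (line : String) : Option Int :=
  let inner := (PySem.Str.slice (PySem.Str.strip line) (some 1) (some (-1))).toList
  (pvSaved inner).map (fun v => PySem.Str.len line - (inner.length : Int) + v)

def part_one_alt (inpt : List String) : Int :=
  ((inpt.mapM pvContrib).map List.sum).getD 0

-- ===== PRECONDITION & SPEC =====
-- well-formedness of the escapes in a decoded literal: a backslash that begins an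
-- escape token must not be the last character (otherwise Python's line[i+1] / s[1]
-- raises IndexError in BOTH programs); Pre_ excludes exactly those raising inputs.
def pvScanOK : List Char → Bool
  | [] => true
  | c :: rest =>
    if c = '\\' then
      match rest with
      | [] => false
      | d :: rest2 =>
        if d = 'x' then
          match rest2 with
          | _ :: _ :: r => pvScanOK r   -- rest2.drop 2; spelled structurally
          | _ => true
        else pvScanOK rest2
    else pvScanOK rest

def Pre_part_one (inpt : List String) : Prop :=
  ∀ line ∈ inpt,
    pvScanOK (PySem.Str.slice (PySem.Str.strip line) (some 1) (some (-1))).toList = true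

instance (inpt : List String) : Decidable (Pre_part_one inpt) := by
  unfold Pre_part_one; infer_instance

def pvWitness_part_one : List String := ["\"ab\\\\c\"", "\"x\""]

def Spec_part_one (inpt : List String) (out : Int) : Prop := out = part_one_alt inpt
instance (inpt : List String) (out : Int) : Decidable (Spec_part_one inpt out) := by
  unfold Spec_part_one; infer_instance

-- ===== CLAIM (what is proved, stated in full; the proofs are below) =====
def Claim_equal_part_one : Prop :=
  ∀ (inpt : List String), Dom_part_one inpt → Pre_part_one inpt →
    Spec_part_one inpt (part_one inpt)

-- ===== LEMMAS AND PROOFS =====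

lemma pvScanOK_cons_ne (c : Char) (rest : List Char) (hc : ¬ c = '\\') :
    pvScanOK (c :: rest) = pvScanOK rest := by
  rw [pvScanOK.eq_def]
  simp [hc]

lemma pvScanOK_bs_x (t : List Char) :
    pvScanOK ('\\' :: 'x' :: t) = pvScanOK (t.drop 2) := by
  match t with
  | [] => rfl
  | [a] => rfl
  | a :: b :: r => rfl

lemma pvScanOK_bs_ne (d : Char) (t : List Char) (hd : ¬ d = 'x') :
    pvScanOK ('\\' :: d :: t) = pvScanOK t := by
  rw [pvScanOK.eq_def]
  simp [hd]

lemma pvSaved_cons_ne (c : Char) (rest : List Char) (hc : ¬ c = '\\') :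
    pvSaved (c :: rest) = pvSaved rest := by
  rw [pvSaved.eq_def]
  simp [hc]

lemma pvSaved_bs_x (t : List Char) :
    pvSaved ('\\' :: 'x' :: t) =
      (pvSaved (t.drop 2)).map
        (fun v => ((('\\' :: 'x' :: t).take 4).length : Int) - 1 + v) := by
  rw [pvSaved.eq_def]
  simp

lemma pvSaved_bs_ne (d : Char) (t : List Char) (hd : ¬ d = 'x') :
    pvSaved ('\\' :: d :: t) = (pvSaved t).map (fun v => 1 + v) := by
  rw [pvSaved.eq_def]
  simp [hd]

lemma pvSaved_isSome_of_scanOK (s : List Char) :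
    pvScanOK s = true → (pvSaved s).isSome := by
  induction s using pvSaved.induct with
  | case1 => intro _; simp [pvSaved]
  | case2 d rest2 hd ih =>
      intro h
      rw [pvScanOK_cons_ne _ _ (by simpa using hd)] at h
      rw [pvSaved_cons_ne _ _ (by simpa using hd)]
      exact ih h
  | case3 d hd =>
      intro h
      have hd' : d = '\\' := not_ne_iff.mp hd
      subst hd'
      exact absurd h (by decide)
  | case4 d hd rest2 ih =>
      intro h
      have hd' : d = '\\' := not_ne_iff.mp hd
      subst hd'
      rw [pvScanOK_bs_x] at h
      rw [pvSaved_bs_x]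
      simpa [Option.isSome_map] using ih h
  | case5 d hd d1 rest2 hdx ih =>
      intro h
      have hd' : d = '\\' := not_ne_iff.mp hd
      subst hd'
      rw [pvScanOK_bs_ne _ _ hdx] at h
      rw [pvSaved_bs_ne _ _ hdx]
      simpa [Option.isSome_map] using ih h

lemma pvLoopA_eq_saved (s : List Char) (i : Nat) (acc : Int)
    (hOK : pvScanOK (s.drop i) = true) :
    pvLoopA s i acc
      = (pvSaved (s.drop i)).map (fun v => acc - ((s.drop i).length : Int) + v) := by
  by_cases h : i < s.length
  · by_cases hc : s[i] = '\\'
    · cases hd : s[i+1]? with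
      | none =>
          exfalso
          have hlen : s.length ≤ i + 1 := List.getElem?_eq_none_iff.mp hd
          have hdrop : s.drop i = [s[i]] := by
            rw [List.drop_eq_getElem_cons h, List.drop_of_length_le hlen]
          rw [hdrop, hc] at hOK
          exact absurd hOK (by decide)
      | some d =>
          have h1 : i + 1 < s.length := by
            by_contra hlt
            rw [List.getElem?_eq_none_iff.mpr (by omega)] at hd
            simp at hd
          have hx : s[i+1] = d := by
            rw [List.getElem?_eq_getElem h1] at hd; exact Option.some.inj hd
          have hdrop : s.drop i = '\\' :: d :: s.drop (i + 2) := by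
            rw [List.drop_eq_getElem_cons h, List.drop_eq_getElem_cons h1, hc, hx]
          have l2 : (s.drop (i + 2)).length = s.length - (i + 2) := List.length_drop ..
          by_cases hdx : d = 'x'
          · subst hdx
            have hdd : (s.drop (i + 2)).drop 2 = s.drop (i + 4) := by
              rw [List.drop_drop]
            have hOK4 : pvScanOK (s.drop (i + 4)) = true := by
              rw [hdrop, pvScanOK_bs_x, hdd] at hOK
              exact hOK
            rw [pvLoopA]
            simp only [dif_pos h, if_pos hc, hd]
            rw [pvLoopA_eq_saved s (i + 4) (acc - 1) hOK4, hdrop, pvSaved_bs_x, hdd]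
            cases hsv : pvSaved (s.drop (i + 4)) with
            | none => simp
            | some v =>
                simp only [Option.map_some]
                have l4 : (s.drop (i + 4)).length = s.length - (i + 4) := List.length_drop ..
                simp [List.length_take, l2, l4]
                omega
          · have hOK2 : pvScanOK (s.drop (i + 2)) = true := by
              rw [hdrop, pvScanOK_bs_ne _ _ hdx] at hOK
              exact hOK
            rw [pvLoopA]
            simp only [dif_pos h, if_pos hc, hd, if_neg hdx]
            rw [pvLoopA_eq_saved s (i + 2) (acc - 1) hOK2, hdrop, pvSaved_bs_ne _ _ hdx]
            cases hsv : pvSaved (s.drop (i + 2)) with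
            | none => simp
            | some v =>
                simp only [Option.map_some]
                congr 1
                simp [l2]
                omega
    · have hdrop : s.drop i = s[i] :: s.drop (i + 1) := List.drop_eq_getElem_cons h
      have hOK1 : pvScanOK (s.drop (i + 1)) = true := by
        rw [hdrop, pvScanOK_cons_ne _ _ hc] at hOK
        exact hOK
      rw [pvLoopA]
      simp only [dif_pos h, if_neg hc]
      rw [pvLoopA_eq_saved s (i + 1) (acc - 1) hOK1, hdrop, pvSaved_cons_ne _ _ hc]
      cases hsv : pvSaved (s.drop (i + 1)) with
      | none => simp
      | some v =>
          simp only [Option.map_some]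
          congr 1
          have l1 : (s.drop (i + 1)).length = s.length - (i + 1) := List.length_drop ..
          simp [l1]
          omega
  · have hdrop : s.drop i = [] := List.drop_of_length_le (by omega)
    rw [pvLoopA]
    simp [h, hdrop, pvSaved]
termination_by s.length - i
decreasing_by all_goals omega

lemma fold_eq (inpt : List String)
    (h : ∀ line ∈ inpt,
      pvScanOK (PySem.Str.slice (PySem.Str.strip line) (some 1) (some (-1))).toList = true) :
    ∀ r : Int,
      inpt.foldl
        (fun acc line =>
          acc.bind (fun r =>
            pvLoopA (PySem.Str.slice (PySem.Str.strip line) (some 1) (some (-1))).toList 0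
              (r + PySem.Str.len line)))
        (some r)
      = (inpt.mapM pvContrib).map (fun xs => r + xs.sum) := by
  induction inpt with
  | nil => intro r; simp
  | cons line rest ih =>
      intro r
      have hline := h line (List.mem_cons_self ..)
      have hrest : ∀ l ∈ rest,
          pvScanOK (PySem.Str.slice (PySem.Str.strip l) (some 1) (some (-1))).toList = true :=
        fun l hl => h l (List.mem_cons_of_mem _ hl)
      obtain ⟨v, hv⟩ := Option.isSome_iff_exists.mp
        (pvSaved_isSome_of_scanOK _ hline)
      have hloop := pvLoopA_eq_saved
        (PySem.Str.slice (PySem.Str.strip line) (some 1) (some (-1))).toList 0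
        (r + PySem.Str.len line) (by simpa using hline)
      simp only [List.drop_zero] at hloop
      simp only [List.foldl_cons, Option.bind_some, hloop, hv, Option.map_some]
      rw [ih hrest]
      simp only [List.mapM_cons, pvContrib, hv, Option.map_some, Option.pure_def]
      cases hm : rest.mapM pvContrib with
      | none => simp
      | some cs =>
          simp only [Option.map_some]
          simp [List.sum_cons]
          ring

-- ===== VERDICT (by name: the statement is the Claim_ definition above) =====
theorem part_one_spec : Claim_equal_part_one := by
  intro inpt _ hpre
  unfold Spec_part_one part_one part_one_alt
  rw [fold_eq inpt hpre 0]
  cases h : inpt.mapM pvContrib with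
  | none => simp
  | some xs => simp
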